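-- pv_equiv track=rewrite | github.com/Ganglet/Benchmarking-Generative-AI-in-EDA-Workflows | Quantitative/waveform_analyzer.py | compare_waveforms
-- ===== SOURCE A (Python) =====
-- from typing import Dict, List, Optional, Tuple
--
-- def compare_waveforms(
--
--     ref_vcd: Dict,
--     gen_vcd: Dict
-- ) -> Dict[str, List[Tuple[int, str, str]]]:
--     """
--     Compare two waveforms to identify mismatches
--
--     Args:
--         ref_vcd: Reference waveform data
--         gen_vcd: Generated waveform data
--
--     Returns:
--         Dictionary mapping signal names to list of (time, ref_value, gen_value) mismatches
--     """
--     mismatches = {}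
--
--     # Compare common signals
--     common_signals = set(ref_vcd.keys()) & set(gen_vcd.keys())
--
--     for signal in common_signals:
--         ref_data = dict(ref_vcd[signal])
--         gen_data = dict(gen_vcd[signal])
--
--         # Find all time points
--         all_times = set(ref_data.keys()) | set(gen_data.keys())
--
--         signal_mismatches = []
--         for time in sorted(all_times):
--             ref_val = ref_data.get(time, "X")
--             gen_val = gen_data.get(time, "X")
--
--             if ref_val != gen_val:
--                 signal_mismatches.append((time, ref_val, gen_val))
--
--         if signal_mismatches:
--             mismatches[signal] = signal_mismatches
--
--     return mismatches
-- ===== SOURCE B (Python) =====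
-- def _signal_diffs(ref_pts, gen_pts):
--     ref_data = dict(ref_pts)
--     gen_data = dict(gen_pts)
--     diffs = [(t, rv, gen_data[t]) for t, rv in ref_data.items()
--              if t in gen_data and gen_data[t] != rv]
--     diffs += [(t, rv, "X") for t, rv in ref_data.items()
--               if t not in gen_data and rv != "X"]
--     diffs += [(t, "X", gv) for t, gv in gen_data.items()
--               if t not in ref_data and gv != "X"]
--     diffs.sort(key=lambda m: m[0])
--     return diffs
--
--
-- def compare_waveforms(ref_vcd, gen_vcd):
--     mismatches = {}
--     for sig, ref_pts in ref_vcd.items():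
--         if sig in gen_vcd:
--             diffs = _signal_diffs(ref_pts, gen_vcd[sig])
--             if diffs:
--                 mismatches[sig] = diffs
--     return mismatches
-- ===== Notes on version B (the rewrite author's own statement) =====
-- stated objective: alternative
-- what changed: A scans the sorted union of both time sets per signal with 'X' defaults; B instead partitions by set membership (common times with differing values, ref-only non-X, gen-only non-X), collects the three passes and sorts each signal's list once.
import Mathlib
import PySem

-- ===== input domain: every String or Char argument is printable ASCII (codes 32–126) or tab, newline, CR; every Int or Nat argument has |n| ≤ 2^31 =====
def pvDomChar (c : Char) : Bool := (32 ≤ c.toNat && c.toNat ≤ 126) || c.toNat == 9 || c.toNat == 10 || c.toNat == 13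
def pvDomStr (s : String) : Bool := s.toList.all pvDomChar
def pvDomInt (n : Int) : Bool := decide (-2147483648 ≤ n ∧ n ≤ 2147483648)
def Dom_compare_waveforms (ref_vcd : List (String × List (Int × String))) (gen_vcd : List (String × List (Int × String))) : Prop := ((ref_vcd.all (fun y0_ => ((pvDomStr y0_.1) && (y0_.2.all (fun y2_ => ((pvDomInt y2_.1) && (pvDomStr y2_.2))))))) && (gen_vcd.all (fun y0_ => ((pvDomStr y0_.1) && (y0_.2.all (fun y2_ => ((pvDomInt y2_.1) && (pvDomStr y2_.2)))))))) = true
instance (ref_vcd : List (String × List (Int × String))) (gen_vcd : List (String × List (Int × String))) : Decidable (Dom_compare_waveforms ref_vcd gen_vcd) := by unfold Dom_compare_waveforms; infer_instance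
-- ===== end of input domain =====

-- B replaces A's scan of the sorted union of time points (with "X" defaults) by three
-- set-difference style passes (both-sides mismatches, ref-only non-X, gen-only non-X)
-- followed by one sort per signal; objective: alternative decomposition, same cost.
-- Output-dict KEY order is compared as Python compares dicts here (ignoring order):
-- both ports emit common signals in ref_vcd's key order.

-- ===== PORT A =====
def compare_waveforms (ref_vcd : List (String × List (Int × String))) (gen_vcd : List (String × List (Int × String))) : List (String × List (Int × String × String)) :=
  let dref := PySem.Dict.ofList ref_vcd
  let dgen := PySem.Dict.ofList gen_vcd
  let common_signals := PySem.Set.inter (PySem.Set.ofList dref.keys) (PySem.Set.ofList dgen.keys)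
  common_signals.foldl (fun mismatches signal =>
    let ref_data := PySem.Dict.ofList ((dref.get? signal).getD [])
    let gen_data := PySem.Dict.ofList ((dgen.get? signal).getD [])
    let all_times := PySem.Set.union (PySem.Set.ofList ref_data.keys) (PySem.Set.ofList gen_data.keys)
    let signal_mismatches := (PySem.List.sorted all_times (fun t => t) false).foldl
      (fun sm time =>
        let ref_val := ref_data.getD time "X"
        let gen_val := gen_data.getD time "X"
        if ref_val ≠ gen_val then sm ++ [(time, ref_val, gen_val)] else sm) []
    if signal_mismatches ≠ [] then mismatches ++ [(signal, signal_mismatches)] else mismatches) []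

-- ===== PORT B =====
def cwSignalDiffs (ref_pts : List (Int × String)) (gen_pts : List (Int × String)) : List (Int × String × String) :=
  let ref_data := PySem.Dict.ofList ref_pts
  let gen_data := PySem.Dict.ofList gen_pts
  let d1 := ref_data.items.filterMap (fun p =>
      match gen_data.get? p.1 with
      | some gv => if gv ≠ p.2 then some (p.1, p.2, gv) else none
      | none => none)
  let d2 := ref_data.items.filterMap (fun p =>
      if gen_data.contains p.1 then none
      else if p.2 ≠ "X" then some (p.1, p.2, "X") else none)
  let d3 := gen_data.items.filterMap (fun p =>
      if ref_data.contains p.1 then none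
      else if p.2 ≠ "X" then some (p.1, "X", p.2) else none)
  PySem.List.sorted (d1 ++ d2 ++ d3) (fun m => m.1) false

def compare_waveforms_alt (ref_vcd : List (String × List (Int × String))) (gen_vcd : List (String × List (Int × String))) : List (String × List (Int × String × String)) :=
  let dgen := PySem.Dict.ofList gen_vcd
  (PySem.Dict.ofList ref_vcd).items.foldl (fun mismatches p =>
    if dgen.contains p.1 then
      let diffs := cwSignalDiffs p.2 ((dgen.get? p.1).getD [])
      if diffs ≠ [] then mismatches ++ [(p.1, diffs)] else mismatches
    else mismatches) []

-- ===== PRECONDITION & SPEC =====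
def Spec_compare_waveforms (ref_vcd : List (String × List (Int × String))) (gen_vcd : List (String × List (Int × String))) (out : List (String × List (Int × String × String))) : Prop := out = compare_waveforms_alt ref_vcd gen_vcd
instance (ref_vcd : List (String × List (Int × String))) (gen_vcd : List (String × List (Int × String))) (out : List (String × List (Int × String × String))) : Decidable (Spec_compare_waveforms ref_vcd gen_vcd out) := by unfold Spec_compare_waveforms; infer_instance

-- ===== CLAIM (what is proved, stated in full; the proofs are below) =====
def Claim_equal_compare_waveforms : Prop := ∀ (ref_vcd : List (String × List (Int × String))) (gen_vcd : List (String × List (Int × String))), Dom_compare_waveforms ref_vcd gen_vcd → Spec_compare_waveforms ref_vcd gen_vcd (compare_waveforms ref_vcd gen_vcd)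

-- ===== LEMMAS AND PROOFS =====

-- append-if fold = filterMap
theorem cwFoldlIf {α β : Type} (l : List α) (p : α → Prop) [DecidablePred p] (v : α → β) (acc : List β) :
    l.foldl (fun acc x => if p x then acc ++ [v x] else acc) acc
      = acc ++ l.filterMap (fun x => if p x then some (v x) else none) := by
  induction l generalizing acc with
  | nil => simp
  | cons a l ih => by_cases h : p a <;> simp [h, ih]

-- a filterMap that is none off a test only sees the filtered list
theorem cwFilterMapFilter {α β : Type} (l : List α) (c : α → Bool) (g : α → Option β)
    (h : ∀ a ∈ l, c a = false → g a = none) :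
    List.filterMap g (l.filter c) = l.filterMap g := by
  induction l with
  | nil => rfl
  | cons a l ih =>
    have ih' := ih (fun a ha => h a (List.mem_cons_of_mem _ ha))
    cases hc : c a with
    | true => simp [hc, List.filterMap_cons, ih']
    | false => simp [hc, h a (List.mem_cons_self) hc, ih']

-- split a filterMap along a test into the two branch filterMaps, up to permutation
theorem cwFilterMapSplit {α β : Type} (l : List α) (c : α → Bool) (g g1 g2 : α → Option β)
    (h1 : ∀ a ∈ l, c a = true → g a = g1 a ∧ g2 a = none)
    (h2 : ∀ a ∈ l, c a = false → g a = g2 a ∧ g1 a = none) :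
    (l.filterMap g).Perm (l.filterMap g1 ++ l.filterMap g2) := by
  induction l with
  | nil => simp
  | cons a l ih =>
    have ih' := ih (fun a ha => h1 a (List.mem_cons_of_mem _ ha))
                   (fun a ha => h2 a (List.mem_cons_of_mem _ ha))
    cases hc : c a with
    | true =>
      obtain ⟨hga, hg2⟩ := h1 a List.mem_cons_self hc
      cases hb : g1 a with
      | none => simpa [List.filterMap_cons, hga, hg2, hb] using ih'
      | some b =>
        simpa [List.filterMap_cons, hga, hg2, hb] using ih'.cons b
    | false =>
      obtain ⟨hga, hg1⟩ := h2 a List.mem_cons_self hc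
      cases hb : g2 a with
      | none => simpa [List.filterMap_cons, hga, hg1, hb] using ih'
      | some b =>
        simp only [List.filterMap_cons, hga, hg1, hb]
        exact (ih'.cons b).trans List.perm_middle.symm

theorem cwSetOfListSelf {α : Type} [BEq α] [LawfulBEq α] (l : List α) (h : l.Nodup) :
    PySem.Set.ofList l = l := by
  have h2 := PySem.Set.update_eq_append_of_disjoint [] l h (by simp)
  rw [PySem.Set.update_nil_left] at h2
  simpa using h2

theorem cwContainsKeys {κ ν : Type} [BEq κ] [LawfulBEq κ] [DecidableEq κ] (d : PySem.Dict κ ν) (k : κ) :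
    d.contains k = d.keys.contains k := by
  rw [PySem.Dict.contains_eq_decide_mem_keys]; simp

-- per-signal equality over arbitrary dicts with unique keys
theorem cwSignalEqGen (rd gd : PySem.Dict Int String) (hrk : rd.keys.Nodup) (hgk : gd.keys.Nodup) :
    (PySem.List.sorted (PySem.Set.union (PySem.Set.ofList rd.keys) (PySem.Set.ofList gd.keys)) (fun t => t) false).foldl
      (fun sm time => if rd.getD time "X" ≠ gd.getD time "X"
        then sm ++ [(time, rd.getD time "X", gd.getD time "X")] else sm) []
    = PySem.List.sorted
        ((rd.items.filterMap (fun p => match gd.get? p.1 with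
            | some gv => if gv ≠ p.2 then some (p.1, p.2, gv) else none
            | none => none))
         ++ (rd.items.filterMap (fun p => if gd.contains p.1 then none
              else if p.2 ≠ "X" then some (p.1, p.2, "X") else none))
         ++ (gd.items.filterMap (fun p => if rd.contains p.1 then none
              else if p.2 ≠ "X" then some (p.1, "X", p.2) else none)))
        (fun m => m.1) false := by
  classical
  have hstep :
      (PySem.List.sorted (PySem.Set.union (PySem.Set.ofList rd.keys) (PySem.Set.ofList gd.keys)) (fun t => t) false).foldl
        (fun sm time => if rd.getD time "X" ≠ gd.getD time "X"
          then sm ++ [(time, rd.getD time "X", gd.getD time "X")] else sm) []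
      = ([] : List (Int × String × String)) ++
        (PySem.List.sorted (PySem.Set.union (PySem.Set.ofList rd.keys) (PySem.Set.ofList gd.keys)) (fun t => t) false).filterMap
          (fun t => if rd.getD t "X" ≠ gd.getD t "X" then some (t, rd.getD t "X", gd.getD t "X") else none) :=
    cwFoldlIf _ _ _ []
  rw [hstep, List.nil_append]
  set f : Int → Option (Int × String × String) :=
    fun t => if rd.getD t "X" ≠ gd.getD t "X" then some (t, rd.getD t "X", gd.getD t "X") else none with hf
  -- the union of the two key sets is set(rk ++ gk)
  have hall : PySem.Set.union (PySem.Set.ofList rd.keys) (PySem.Set.ofList gd.keys)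
      = PySem.Set.ofList (rd.keys ++ gd.keys) := by
    rw [PySem.Set.ofList_append, cwSetOfListSelf gd.keys hgk]
    rfl
  rw [hall]
  -- first components of f's results
  have hfst : ∀ t m, f t = some m → m.1 = t := by
    intro t m hm
    by_cases h : rd.getD t "X" ≠ gd.getD t "X" <;> simp [hf, h] at hm
    simp [← hm]
  refine (PySem.List.sorted_eq_of_perm_of_pairwise_lt _ _ _ ?_ ?_).symm
  · -- permutation
    have h1 : ((PySem.List.sorted (PySem.Set.ofList (rd.keys ++ gd.keys)) (fun t => t) false).filterMap f).Perm
        ((PySem.Set.ofList (rd.keys ++ gd.keys)).filterMap f) :=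
      (PySem.List.sorted_perm _ _ _).filterMap f
    have hsplit : PySem.Set.ofList (rd.keys ++ gd.keys)
        = rd.keys ++ gd.keys.filter (fun y => !(PySem.Set.contains rd.keys y)) := by
      rw [PySem.Set.ofList_append, cwSetOfListSelf rd.keys hrk, PySem.Set.update_eq_append_filter,
        cwSetOfListSelf gd.keys hgk]
    refine h1.trans ?_
    rw [hsplit, List.filterMap_append]
    -- ref-side: split into "both" and "ref-only" passes
    have hR : (rd.keys.filterMap f).Perm
        ((rd.items.filterMap (fun p => match gd.get? p.1 with
            | some gv => if gv ≠ p.2 then some (p.1, p.2, gv) else none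
            | none => none))
         ++ (rd.items.filterMap (fun p => if gd.contains p.1 then none
              else if p.2 ≠ "X" then some (p.1, p.2, "X") else none))) := by
      have hmap : rd.keys.filterMap f = rd.items.filterMap (f ∘ (fun p => p.1)) := by
        show (rd.items.map (fun p => p.1)).filterMap f = _
        exact List.filterMap_map
      rw [hmap]
      refine cwFilterMapSplit rd.items (fun p => gd.contains p.1) _ _ _ ?_ ?_
      · intro p hp hc0
        have hc : gd.contains p.1 = true := hc0
        obtain ⟨gv, hgv⟩ : ∃ gv, gd.get? p.1 = some gv := by
          cases h : gd.get? p.1 with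
          | none => rw [(PySem.Dict.get?_eq_none_iff_contains gd p.1).mp h] at hc; cases hc
          | some gv => exact ⟨gv, rfl⟩
        have hrv : rd.getD p.1 "X" = p.2 := PySem.Dict.getD_of_mem_items rd hp hrk "X"
        have hgvD : gd.getD p.1 "X" = gv := PySem.Dict.getD_of_get?_eq_some gd "X" hgv
        constructor
        · show f p.1 = _
          rw [hf]
          simp only [hrv, hgvD, hgv]
          rcases eq_or_ne p.2 gv with h | h
          · subst h; simp
          · simp [h, h.symm]
        · simp [hc]
      · intro p hp hc0
        have hc : gd.contains p.1 = false := hc0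
        have hnone : gd.get? p.1 = none := (PySem.Dict.get?_eq_none_iff_contains gd p.1).mpr hc
        have hrv : rd.getD p.1 "X" = p.2 := PySem.Dict.getD_of_mem_items rd hp hrk "X"
        have hgvD : gd.getD p.1 "X" = "X" := PySem.Dict.getD_of_not_contains gd "X" hc
        constructor
        · show f p.1 = _
          rw [hf]
          simp only [hrv, hgvD, hc, Bool.false_eq_true, if_false]
        · simp [hnone]
    -- gen-side: the gen-only pass, an equality
    have hG : (gd.keys.filter (fun y => !(PySem.Set.contains rd.keys y))).filterMap f
        = gd.items.filterMap (fun p => if rd.contains p.1 then none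
            else if p.2 ≠ "X" then some (p.1, "X", p.2) else none) := by
      have hmap : gd.keys.filter (fun y => !(PySem.Set.contains rd.keys y))
          = (gd.items.filter ((fun y => !(PySem.Set.contains rd.keys y)) ∘ (fun p => p.1))).map (fun p => p.1) := by
        show (gd.items.map (fun p => p.1)).filter _ = _
        exact List.filter_map
      have hnone : ∀ p ∈ gd.items, ((fun y => !(PySem.Set.contains rd.keys y)) ∘ (fun p => p.1)) p = false →
          (fun p : Int × String => if rd.contains p.1 then none
            else if p.2 ≠ "X" then some (p.1, "X", p.2) else none) p = none := by
        intro p hp hc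
        have hct : rd.contains p.1 = true := by
          rw [cwContainsKeys]
          simpa using hc
        simp [hct]
      rw [hmap, List.filterMap_map,
        ← cwFilterMapFilter gd.items ((fun y => !(PySem.Set.contains rd.keys y)) ∘ (fun p => p.1)) _ hnone]
      refine List.filterMap_congr ?_
      intro p hp
      obtain ⟨hpm, hq⟩ := List.mem_filter.mp hp
      have hrc : rd.contains p.1 = false := by
        rw [cwContainsKeys]
        simpa using hq
      have hrv : rd.getD p.1 "X" = "X" := PySem.Dict.getD_of_not_contains rd "X" hrc
      have hgv : gd.getD p.1 "X" = p.2 := PySem.Dict.getD_of_mem_items gd hpm hgk "X"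
      show f p.1 = _
      rw [hf]
      simp only [hrv, hgv, hrc, Bool.false_eq_true, if_false]
      rcases eq_or_ne p.2 "X" with h | h
      · simp [h]
      · simp [h, h.symm]
    rw [hG]
    exact hR.append_right _
  · -- strict sortedness of the filtered sorted union
    have hsorted := PySem.List.sorted_ofList_pairwise_lt (rd.keys ++ gd.keys)
    refine List.pairwise_filterMap.mpr (hsorted.imp ?_)
    intro a b hab m hm m2 hm2
    rw [hfst a m hm, hfst b m2 hm2]
    exact hab

theorem cwSignalEq (rp gp : List (Int × String)) :
    (PySem.List.sorted (PySem.Set.union (PySem.Set.ofList (PySem.Dict.ofList rp).keys)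
        (PySem.Set.ofList (PySem.Dict.ofList gp).keys)) (fun t => t) false).foldl
      (fun sm time =>
        if (PySem.Dict.ofList rp).getD time "X" ≠ (PySem.Dict.ofList gp).getD time "X"
        then sm ++ [(time, (PySem.Dict.ofList rp).getD time "X", (PySem.Dict.ofList gp).getD time "X")]
        else sm) []
    = cwSignalDiffs rp gp :=
  cwSignalEqGen (PySem.Dict.ofList rp) (PySem.Dict.ofList gp)
    (PySem.Dict.nodup_keys_ofList rp) (PySem.Dict.nodup_keys_ofList gp)

-- nested append-if fold = filterMap
theorem cwFoldlIf2 {α β : Type} (l : List α) (c : α → Bool) (p : α → Prop) [DecidablePred p] (v : α → β) (acc : List β) :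
    l.foldl (fun acc x => if c x then (if p x then acc ++ [v x] else acc) else acc) acc
      = acc ++ l.filterMap (fun x => if c x then (if p x then some (v x) else none) else none) := by
  induction l generalizing acc with
  | nil => simp
  | cons a l ih =>
    cases hc : c a
    · simp [hc, ih]
    · by_cases h : p a <;> simp [hc, h, ih]

-- A's per-signal scan, as a function of the signal name (proof helper)
def cwA1 (dref dgen : PySem.Dict String (List (Int × String))) (s : String) : List (Int × String × String) :=
  (PySem.List.sorted (PySem.Set.union
      (PySem.Set.ofList (PySem.Dict.ofList ((dref.get? s).getD [])).keys)
      (PySem.Set.ofList (PySem.Dict.ofList ((dgen.get? s).getD [])).keys)) (fun t => t) false).foldl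
    (fun sm time =>
      if (PySem.Dict.ofList ((dref.get? s).getD [])).getD time "X"
          ≠ (PySem.Dict.ofList ((dgen.get? s).getD [])).getD time "X"
      then sm ++ [(time, (PySem.Dict.ofList ((dref.get? s).getD [])).getD time "X",
                    (PySem.Dict.ofList ((dgen.get? s).getD [])).getD time "X")]
      else sm) []

theorem cwMainEq (r g : List (String × List (Int × String))) :
    compare_waveforms r g = compare_waveforms_alt r g := by
  classical
  have hrk : (PySem.Dict.ofList r).keys.Nodup := PySem.Dict.nodup_keys_ofList r
  have hgk : (PySem.Dict.ofList g).keys.Nodup := PySem.Dict.nodup_keys_ofList g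
  have hA : compare_waveforms r g
      = ([] : List (String × List (Int × String × String))) ++
        (PySem.Set.inter (PySem.Set.ofList (PySem.Dict.ofList r).keys)
          (PySem.Set.ofList (PySem.Dict.ofList g).keys)).filterMap
          (fun s => if cwA1 (PySem.Dict.ofList r) (PySem.Dict.ofList g) s ≠ []
            then some (s, cwA1 (PySem.Dict.ofList r) (PySem.Dict.ofList g) s) else none) :=
    cwFoldlIf _ _ _ []
  have hB : compare_waveforms_alt r g
      = ([] : List (String × List (Int × String × String))) ++
        (PySem.Dict.ofList r).items.filterMap
          (fun p => if (PySem.Dict.ofList g).contains p.1 then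
              (if cwSignalDiffs p.2 (((PySem.Dict.ofList g).get? p.1).getD []) ≠ []
               then some (p.1, cwSignalDiffs p.2 (((PySem.Dict.ofList g).get? p.1).getD [])) else none)
            else none) :=
    cwFoldlIf2 _ _ _ _ []
  rw [hA, hB, List.nil_append, List.nil_append]
  have hcommon : PySem.Set.inter (PySem.Set.ofList (PySem.Dict.ofList r).keys)
      (PySem.Set.ofList (PySem.Dict.ofList g).keys)
      = (PySem.Dict.ofList r).keys.filter (fun s => (PySem.Dict.ofList g).contains s) := by
    show (PySem.Set.ofList (PySem.Dict.ofList r).keys).filter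
        (fun x => PySem.Set.contains (PySem.Set.ofList (PySem.Dict.ofList g).keys) x) = _
    rw [cwSetOfListSelf _ hrk, cwSetOfListSelf _ hgk]
    exact List.filter_congr (fun s _ => (cwContainsKeys (PySem.Dict.ofList g) s).symm)
  have hfm : (PySem.Dict.ofList r).keys.filter (fun s => (PySem.Dict.ofList g).contains s)
      = ((PySem.Dict.ofList r).items.filter (fun p => (PySem.Dict.ofList g).contains p.1)).map
          (fun p => p.1) := by
    show ((PySem.Dict.ofList r).items.map (fun p => p.1)).filter _ = _
    rw [List.filter_map]
    exact congrArg (List.map _) (List.filter_congr (fun p _ => rfl))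
  rw [hcommon, hfm, List.filterMap_map,
    ← cwFilterMapFilter (PySem.Dict.ofList r).items (fun p => (PySem.Dict.ofList g).contains p.1) _
      (by intro p _ hc; simp [hc])]
  refine List.filterMap_congr ?_
  intro p hp
  obtain ⟨hpm, hc⟩ := List.mem_filter.mp hp
  have hget : (PySem.Dict.ofList r).get? p.1 = some p.2 :=
    PySem.Dict.get?_of_mem_items (PySem.Dict.ofList r) hpm hrk
  show (if cwA1 (PySem.Dict.ofList r) (PySem.Dict.ofList g) p.1 ≠ []
      then some (p.1, cwA1 (PySem.Dict.ofList r) (PySem.Dict.ofList g) p.1) else none) = _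
  have hA1 : cwA1 (PySem.Dict.ofList r) (PySem.Dict.ofList g) p.1
      = cwSignalDiffs (((PySem.Dict.ofList r).get? p.1).getD [])
          (((PySem.Dict.ofList g).get? p.1).getD []) :=
    cwSignalEq _ _
  rw [hget, Option.getD_some] at hA1
  rw [hA1]
  simp [hc]

-- ===== VERDICT (by name: the statement is the Claim_ definition above) =====
theorem compare_waveforms_spec : Claim_equal_compare_waveforms := by
  intro r g _
  show compare_waveforms r g = compare_waveforms_alt r g
  exact cwMainEq r g
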